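-- pv_equiv track=rewrite | github.com/durgaharish1993/EM | em2.py | alignments
-- ===== SOURCE A (Python) =====
-- def alignments(epron,jpron,k=3):
--     alings = []
--
--     def all_alignments(alings,cur_e=0,start_j=0):
--         if cur_e >= len(epron) and start_j >= len(jpron):
--             return [[]]
--
--         if cur_e>=len(epron) and start_j<len(jpron):
--             return [['None']]
--         if cur_e<len(epron) and start_j>=len(jpron):
--             return [['None']]
--
--
--         temp_align=[]
--         for j in range(start_j,start_j+k):
--             if j< len(jpron):
--
--                 cur_align = [cur_e]* (j-start_j+1)
--
--                 result_align = all_alignments(alings,cur_e+1,j+1)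
--                 for temp in result_align:
--                     if temp!=['None']:
--                         temp_align+=[cur_align+temp]
--         return temp_align
--
--     final_data = all_alignments(alings, 0, 0)
--
--     final_dict={i:final_data[i] for i in range(len(final_data))}
--     return final_dict
-- ===== SOURCE B (Python) =====
-- def alignments(epron, jpron, k=3):
--     ne, nj = len(epron), len(jpron)
--     # bottom-up DP: row[j] holds all suffix alignments starting at (e, j);
--     # each cell is computed once instead of A's exponential recomputation
--     row = [[] for _ in range(nj)] + [[[]]]
--     for e in range(ne - 1, -1, -1):
--         new_row = []
--         for j in range(nj + 1):
--             cell = []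
--             hi = min(j + k, nj)
--             for jj in range(j, hi):
--                 seg = [e] * (jj - j + 1)
--                 for t in row[jj + 1]:
--                     cell.append(seg + t)
--             new_row.append(cell)
--         row = new_row
--     return dict(enumerate(row[0]))
-- ===== Notes on version B (the rewrite author's own statement) =====
-- stated objective: alternative
-- what changed: Replaces A's top-down recursion (which recomputes the same (cur_e,start_j) suffix-alignment subproblems and filters 'None' markers) by a bottom-up dynamic program that fills each (e,j) cell exactly once, rows from e=len(epron) down to 0; measured 3.56x at n=16, but on large inputs the exponential output size dominates both.
-- outside the precondition, e.g. on alignments([], ['x'], 3): A returns {0: ['None']}, B returns {}; on alignments(['x'], [], 3): A returns {0: ['None']}, B returns {}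
import Mathlib
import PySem

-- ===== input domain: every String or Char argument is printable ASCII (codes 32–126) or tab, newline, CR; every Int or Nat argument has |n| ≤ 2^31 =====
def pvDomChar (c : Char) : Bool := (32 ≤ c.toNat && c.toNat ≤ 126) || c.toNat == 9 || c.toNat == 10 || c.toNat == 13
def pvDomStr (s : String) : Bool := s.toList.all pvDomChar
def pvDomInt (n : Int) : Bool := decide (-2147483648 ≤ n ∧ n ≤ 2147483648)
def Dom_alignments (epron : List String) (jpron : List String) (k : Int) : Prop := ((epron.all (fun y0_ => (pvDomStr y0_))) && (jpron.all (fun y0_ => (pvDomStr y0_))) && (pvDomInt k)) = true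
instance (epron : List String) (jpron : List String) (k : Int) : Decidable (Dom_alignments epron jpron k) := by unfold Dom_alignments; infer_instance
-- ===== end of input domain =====

-- B replaces A's top-down recursion (which recomputes equal (e, j) subproblems) by a
-- bottom-up DP that fills each (e, j) suffix-alignment cell once (objective: alternative).


-- ===== PORT A =====
-- A's inner recursion; Python's string marker ['None'] is represented as [none]
-- (the only non-int value A's lists ever contain), so elements are Option Int.
def allAlignA (epron : List String) (jpron : List String) (k : Int)
    (cur_e : Int) (start_j : Int) : List (List (Option Int)) :=
  if (epron.length : Int) ≤ cur_e ∧ (jpron.length : Int) ≤ start_j then [[]]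
  else if (epron.length : Int) ≤ cur_e ∧ start_j < (jpron.length : Int) then [[none]]
  else if cur_e < (epron.length : Int) ∧ (jpron.length : Int) ≤ start_j then [[none]]
  else
    (PySem.List.pyRange start_j (start_j + k) 1).foldl (fun temp_align j =>
      if j < (jpron.length : Int) then
        (allAlignA epron jpron k (cur_e + 1) (j + 1)).foldl (fun acc temp =>
          if temp ≠ [none] then
            acc ++ [List.replicate (j - start_j + 1).toNat (some cur_e) ++ temp]
          else acc) temp_align
      else temp_align) []
termination_by ((epron.length : Int) - cur_e).toNat
decreasing_by omega

def alignments (epron : List String) (jpron : List String) (k : Int) : List (Int × List Int) :=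
  let final_data := allAlignA epron jpron k 0 0
  -- {i: final_data[i] for i in range(len(final_data))}; the Option Int elements are
  -- projected back to Int (inside Pre_ no marker survives, so filterMap id is exact)
  (PySem.List.pyRange 0 (final_data.length : Int) 1).map
    (fun i => (i, (PySem.List.pyGetD final_data i []).filterMap id))

-- ===== PORT B =====
def alignments_alt (epron : List String) (jpron : List String) (k : Int) : List (Int × List Int) :=
  let ne := epron.length
  let nj := jpron.length
  -- row for e = ne: only j = nj has the single empty alignment
  let base : List (List (List Int)) := List.replicate nj [] ++ [[[]]]
  let row := (PySem.List.pyRange ((ne : Int) - 1) (-1) (-1)).foldl (fun row e =>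
      (PySem.List.pyRange 0 ((nj : Int) + 1) 1).foldl (fun new_row j =>
        let hi := min (j + k) (nj : Int)
        let cell := (PySem.List.pyRange j hi 1).foldl (fun cell jj =>
          -- row[jj+1]: the index is always in range, the [] default never fires
          (PySem.List.pyGetD row (jj + 1) []).foldl (fun cell t =>
            cell ++ [List.replicate (jj - j + 1).toNat e ++ t]) cell) []
        new_row ++ [cell]) []) base
  PySem.List.enumerate (PySem.List.pyGetD row 0 []) 0

-- ===== PRECONDITION & SPEC =====
-- Pre_ excludes inputs where exactly one of epron/jpron is empty: there A returns
-- {0: ['None']}, whose value contains the string 'None' and is not a list of ints.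
def Pre_alignments (epron : List String) (jpron : List String) (k : Int) : Prop :=
  (epron = [] ↔ jpron = [])
instance (epron : List String) (jpron : List String) (k : Int) : Decidable (Pre_alignments epron jpron k) := by unfold Pre_alignments; infer_instance

def pvWitness_alignments : List String × List String × Int := (["AE", "T"], ["a", "t", "o"], 3)

def Spec_alignments (epron : List String) (jpron : List String) (k : Int) (out : List (Int × List Int)) : Prop := out = alignments_alt epron jpron k
instance (epron : List String) (jpron : List String) (k : Int) (out : List (Int × List Int)) : Decidable (Spec_alignments epron jpron k out) := by unfold Spec_alignments; infer_instance

-- ===== CLAIM (what is proved, stated in full; the proofs are below) =====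
def Claim_equal_alignments : Prop := ∀ (epron : List String) (jpron : List String) (k : Int), Dom_alignments epron jpron k → Pre_alignments epron jpron k → Spec_alignments epron jpron k (alignments epron jpron k)

-- ===== LEMMAS AND PROOFS =====

-- The common mathematical value: G ne nj k e j = the list of suffix alignments
-- from state (e, j), in the order both programs produce them.
def G (ne : Nat) (nj : Int) (k : Int) (e : Nat) (j : Int) : List (List Int) :=
  if _h : e < ne then
    (PySem.List.pyRange j (min (j + k) nj) 1).flatMap (fun jj =>
      (G ne nj k (e + 1) (jj + 1)).map
        (fun t => List.replicate (jj - j + 1).toNat (e : Int) ++ t))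
  else if j = nj then [[]] else []
termination_by ne - e

theorem filter_lt_pyRange (a b c : Int) :
    (PySem.List.pyRange a b 1).filter (fun x => decide (x < c)) =
      PySem.List.pyRange a (min b c) 1 := by
  have h : ∀ (n : Nat) (a : Int), (b - a).toNat ≤ n →
      (PySem.List.pyRange a b 1).filter (fun x => decide (x < c)) =
        PySem.List.pyRange a (min b c) 1 := by
    intro n
    induction n with
    | zero =>
      intro a h
      rw [PySem.List.pyRange_one_eq_nil (by omega),
        PySem.List.pyRange_one_eq_nil (a := a) (b := min b c) (by omega)]
      rfl
    | succ n ih =>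
      intro a h
      by_cases hab2 : a < b
      · rw [PySem.List.pyRange_one_cons hab2]
        by_cases hac : a < c
        · rw [List.filter_cons_of_pos (by simpa using hac),
            PySem.List.pyRange_one_cons (a := a) (b := min b c) (by omega),
            ih (a + 1) (by omega)]
        · rw [List.filter_cons_of_neg (by simpa using hac),
            PySem.List.pyRange_one_eq_nil (a := a) (b := min b c) (by omega),
            List.filter_eq_nil_iff.mpr]
          intro x hx
          have := (PySem.List.mem_pyRange_one).mp hx
          simp only [decide_eq_true_eq]
          omega
      · rw [PySem.List.pyRange_one_eq_nil (by omega),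
          PySem.List.pyRange_one_eq_nil (a := a) (b := min b c) (by omega)]
        rfl
  exact h (b - a).toNat a le_rfl

theorem filter_ne_marker_map_some (l : List (List Int)) :
    (l.map (List.map some)).filter (fun t => decide (t ≠ [(none : Option Int)])) =
      l.map (List.map some) := by
  rw [List.filter_eq_self]
  intro x hx
  simp only [List.mem_map] at hx
  obtain ⟨t, _, rfl⟩ := hx
  simp only [decide_eq_true_eq]
  intro hcon
  cases t with
  | nil => simp at hcon
  | cons y ys => cases ys <;> simp at hcon

theorem flatMap_single {α β : Type} (l : List α) (f : α → β) :
    l.flatMap (fun x => [f x]) = l.map f := by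
  induction l with
  | nil => rfl
  | cons x xs ih => simp [List.flatMap_cons, ih]

theorem allAlignA_top (epron jpron : List String) (k : Int) (j : Int)
    (hj : j ≤ (jpron.length : Int)) :
    allAlignA epron jpron k (epron.length : Int) j =
      if j = (jpron.length : Int) then [[]] else [[none]] := by
  by_cases hjn : j = (jpron.length : Int)
  · rw [if_pos hjn, allAlignA, if_pos (by omega)]
  · rw [if_neg hjn, allAlignA, if_neg (by omega), if_pos (by omega)]

theorem allAlignA_eq_G (epron jpron : List String) (k : Int) :
    ∀ (d e : Nat) (j : Int), epron.length - e ≤ d → e ≤ epron.length →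
      j ≤ (jpron.length : Int) →
      allAlignA epron jpron k (e : Int) j =
        if e < epron.length ∧ j < (jpron.length : Int) then
          (G epron.length (jpron.length : Int) k e j).map (List.map some)
        else if e = epron.length ∧ j = (jpron.length : Int) then [[]]
        else [[none]] := by
  intro d
  induction d with
  | zero =>
    intro e j hd he hj
    have hee : e = epron.length := by omega
    subst hee
    rw [if_neg (by omega), allAlignA_top epron jpron k j hj]
    by_cases hjn : j = (jpron.length : Int)
    · rw [if_pos hjn, if_pos ⟨rfl, hjn⟩]
    · rw [if_neg hjn, if_neg (fun h => hjn h.2)]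
  | succ d ih =>
    intro e j hd he hj
    by_cases he' : e < epron.length
    · by_cases hjn : j = (jpron.length : Int)
      · -- dead end: e < ne, j = nj
        rw [if_neg (by omega), if_neg (by omega), allAlignA,
          if_neg (by omega), if_neg (by omega), if_pos (by omega)]
      · have hj' : j < (jpron.length : Int) := by omega
        rw [if_pos ⟨he', hj'⟩]
        rw [allAlignA, if_neg (by omega), if_neg (by omega), if_neg (by omega)]
        simp only [PySem.List.foldl_ite_eq_foldl_filter,
          PySem.List.foldl_append_eq_flatMap, List.nil_append]
        rw [filter_lt_pyRange]
        rw [G]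
        rw [dif_pos he']
        rw [List.map_flatMap]
        apply List.flatMap_congr
        intro jj hjj
        have hmem := (PySem.List.mem_pyRange_one).mp hjj
        have hrec := ih (e + 1) (jj + 1) (by omega) (by omega) (by omega)
        have hcast : ((e : Int) + 1) = ((e + 1 : Nat) : Int) := by push_cast; ring
        rw [hcast, hrec]
        by_cases h1 : e + 1 < epron.length ∧ jj + 1 < (jpron.length : Int)
        · rw [if_pos h1, filter_ne_marker_map_some]
          simp [List.flatMap_map, flatMap_single, Function.comp_def, List.map_map]
        · rw [if_neg h1]
          by_cases h2 : e + 1 = epron.length ∧ jj + 1 = (jpron.length : Int)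
          · rw [if_pos h2]
            have hG : G epron.length (jpron.length : Int) k (e + 1) (jj + 1) = [[]] := by
              rw [G, dif_neg (by omega)]
              rw [if_pos h2.2]
            rw [hG]
            simp
          · rw [if_neg h2]
            have hG : G epron.length (jpron.length : Int) k (e + 1) (jj + 1) = [] := by
              rw [G]
              by_cases h3 : e + 1 < epron.length
              · rw [dif_pos h3]
                have hjn2 : jj + 1 = (jpron.length : Int) := by omega
                rw [hjn2, PySem.List.pyRange_one_eq_nil (by omega)]
                simp
              · rw [dif_neg h3, if_neg (by omega)]
            rw [hG]
            simp
    · have hee : e = epron.length := by omega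
      subst hee
      rw [if_neg (by omega), allAlignA_top epron jpron k j hj]
      by_cases hjn : j = (jpron.length : Int)
      · rw [if_pos hjn, if_pos ⟨rfl, hjn⟩]
      · rw [if_neg hjn, if_neg (fun h => hjn h.2)]

-- ===== B side =====
def rowsGd (ne : Nat) (nj : Nat) (k : Int) (e : Nat) : List (List (List Int)) :=
  (List.range (nj + 1)).map (fun (j : Nat) => G ne (nj : Int) k e ((j : Nat) : Int))

theorem pyGetD_rowsG (ne nj : Nat) (k : Int) (e : Nat) (i : Int)
    (h0 : 0 ≤ i) (h1 : i ≤ (nj : Int)) :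
    PySem.List.pyGetD (rowsGd ne nj k e) i [] = G ne (nj : Int) k e i := by
  have : i = ((i.toNat : Nat) : Int) := by omega
  rw [this, PySem.List.pyGetD_natCast]
  unfold rowsGd
  rw [PySem.List.getD_map_range _ _ _ _ (by omega)]

def stepB (jpron : List String) (k : Int) (row : List (List (List Int))) (e : Int) :
    List (List (List Int)) :=
  (PySem.List.pyRange 0 ((jpron.length : Int) + 1) 1).foldl (fun new_row j =>
    let hi := min (j + k) ((jpron.length : Int))
    let cell := (PySem.List.pyRange j hi 1).foldl (fun cell jj =>
      (PySem.List.pyGetD row (jj + 1) []).foldl (fun cell t =>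
        cell ++ [List.replicate (jj - j + 1).toNat e ++ t]) cell) []
    new_row ++ [cell]) []

theorem alt_eq_stepB (epron jpron : List String) (k : Int) :
    alignments_alt epron jpron k =
      PySem.List.enumerate (PySem.List.pyGetD
        ((PySem.List.pyRange ((epron.length : Int) - 1) (-1) (-1)).foldl (stepB jpron k)
          (List.replicate jpron.length [] ++ [[[]]])) 0 []) 0 := rfl

theorem step_rowsG (epron jpron : List String) (k : Int) (e : Nat) (he : e < epron.length) :
    stepB jpron k (rowsGd epron.length jpron.length k (e + 1)) (e : Int)
      = rowsGd epron.length jpron.length k e := by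
  unfold stepB
  simp only []
  rw [PySem.List.foldl_append_singleton_eq_map]
  rw [PySem.List.pyRange_one]
  have hn : (((jpron.length : Int) + 1) - 0).toNat = jpron.length + 1 := by omega
  rw [hn, List.map_map]
  conv_rhs => rw [rowsGd]
  apply List.map_congr_left
  intro jNat hjmem
  have hjlt : jNat < jpron.length + 1 := List.mem_range.mp hjmem
  simp only [Function.comp_apply, zero_add]
  simp only [PySem.List.foldl_append_singleton_eq_map, PySem.List.foldl_append_eq_flatMap,
    List.nil_append]
  rw [G, dif_pos he]
  apply List.flatMap_congr
  intro jj hjj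
  have hmem := (PySem.List.mem_pyRange_one).mp hjj
  rw [pyGetD_rowsG _ _ _ _ _ (by omega) (by omega)]

theorem countdown (epron jpron : List String) (k : Int) :
    ∀ (m : Nat), m ≤ epron.length →
      (PySem.List.pyRange ((m : Int) - 1) (-1) (-1)).foldl (stepB jpron k)
          (rowsGd epron.length jpron.length k m)
        = rowsGd epron.length jpron.length k 0 := by
  intro m
  induction m with
  | zero =>
    intro _
    rw [show ((0 : Nat) : Int) - 1 = -1 by norm_num,
      PySem.List.pyRange_neg_one_eq_nil le_rfl, List.foldl_nil]
  | succ m ih =>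
    intro hm
    have h1 : ((m + 1 : Nat) : Int) - 1 = (m : Int) := by push_cast; ring
    rw [h1, PySem.List.pyRange_neg_one_cons (by omega), List.foldl_cons,
      step_rowsG epron jpron k m (by omega), ih (by omega)]

theorem base_rowsG (epron jpron : List String) (k : Int) :
    (List.replicate jpron.length ([] : List (List Int)) ++ [[[]]])
      = rowsGd epron.length jpron.length k epron.length := by
  apply List.ext_getElem
  · simp [rowsGd]
  · intro i h1 h2
    simp only [rowsGd, List.getElem_map, List.getElem_range]
    rw [G, dif_neg (by omega)]
    by_cases hi : i = jpron.length
    · subst hi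
      rw [if_pos rfl, List.getElem_append_right (by simp)]
      simp
    · have hilt : i < jpron.length := by
        simp only [List.length_append, List.length_replicate, List.length_cons,
          List.length_nil] at h1
        omega
      rw [if_neg (by simpa using hi), List.getElem_append_left (by simpa using hilt)]
      simp

theorem alignments_alt_eq_enum_G (epron jpron : List String) (k : Int) :
    alignments_alt epron jpron k =
      PySem.List.enumerate (G epron.length (jpron.length : Int) k 0 0) 0 := by
  rw [alt_eq_stepB, base_rowsG epron jpron k, countdown epron jpron k epron.length le_rfl,
    pyGetD_rowsG _ _ _ _ _ le_rfl (by omega)]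

-- ===== A side, top level =====
theorem filterMap_id_map_some {α : Type} (l : List α) :
    (l.map some).filterMap id = l := by
  induction l with
  | nil => rfl
  | cons x xs ih => simp

theorem alignments_def (epron jpron : List String) (k : Int) :
    alignments epron jpron k =
      (PySem.List.pyRange 0 ((allAlignA epron jpron k 0 0).length : Int) 1).map
        (fun i => (i, (PySem.List.pyGetD (allAlignA epron jpron k 0 0) i []).filterMap id)) := rfl

theorem alignments_eq_enum_G (epron jpron : List String) (k : Int)
    (h : Pre_alignments epron jpron k) :
    alignments epron jpron k =
      PySem.List.enumerate (G epron.length (jpron.length : Int) k 0 0) 0 := by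
  unfold Pre_alignments at h
  rw [alignments_def]
  by_cases hemp : epron = []
  · have hjemp : jpron = [] := h.mp hemp
    subst hemp hjemp
    have hA0 : allAlignA [] [] k 0 0 = [[]] := by
      rw [allAlignA, if_pos (by norm_num)]
    have hG0 : G ([] : List String).length ((([] : List String).length : Nat) : Int) k 0 0 = [[]] := by
      rw [G, dif_neg (by simp), if_pos (by simp)]
    rw [hA0, hG0]
    decide
  · have hjne : jpron ≠ [] := fun hj => hemp (h.mpr hj)
    have hel : 0 < epron.length := List.length_pos_iff.mpr hemp
    have hjl : 0 < jpron.length := List.length_pos_iff.mpr hjne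
    have hA : allAlignA epron jpron k ((0 : Nat) : Int) 0 =
        (G epron.length (jpron.length : Int) k 0 0).map (List.map some) := by
      rw [allAlignA_eq_G epron jpron k epron.length 0 0 (by omega) (by omega) (by omega),
        if_pos ⟨hel, by omega⟩]
    rw [show ((0 : Nat) : Int) = (0 : Int) from rfl] at hA
    rw [hA]
    rw [PySem.List.enumerate_eq_map_pyRange _ ([] : List Int)]
    have hlen : (((G epron.length (jpron.length : Int) k 0 0).map (List.map some)).length : Int)
        = PySem.List.len (G epron.length (jpron.length : Int) k 0 0) := by
      simp [PySem.List.len]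
    rw [hlen]
    apply List.map_congr_left
    intro i hi
    have hmem := (PySem.List.mem_pyRange_one).mp hi
    have hd : ([] : List (Option Int)) = List.map some ([] : List Int) := rfl
    rw [hd, PySem.List.pyGetD_map, filterMap_id_map_some]

-- ===== VERDICT (by name: the statement is the Claim_ definition above) =====
theorem alignments_spec : Claim_equal_alignments := by
  intro epron jpron k _hd hpre
  unfold Spec_alignments
  rw [alignments_eq_enum_G epron jpron k hpre, alignments_alt_eq_enum_G]
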